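-- pv_equiv track=rewrite | github.com/Ashiq-am/Path-of-Python | 3.Data Types/Arrays Set 1 and Set 2/Prefix Sum/Good characters/Good characters.py | count_good_characters
-- ===== SOURCE A (Python) =====
-- MAX_CHARS = 26
--
-- def count_good_characters(A, K):
-- 	n = len(A)
-- 	ans = 0
--
-- 	for o in range(MAX_CHARS):
-- 		mp = [0] * (2 * n + 1) # Initialize frequency array
-- 		mp[n] = 1 # Initialize with one occurrence to handle empty substring case
--
-- 		occurrence = 0
-- 		total = n
-- 		prefix_sum = [n] * (n + 1)
--
-- 		for i in range(n):
-- 			x = 1 if A[i] == chr(ord('a') + o) else -1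
-- 			occurrence += x
-- 			total += x
-- 			prefix_sum[i + 1] = total
-- 			ans += mp[total - K]
--
-- 			# Check for substrings with negative length
-- 			if K < 0 and (i + 1 + K >= 0) and (prefix_sum[i + 1 + K] == total - K):
-- 				ans -= 1
--
-- 			mp[total] += 1
--
-- 	return ans
-- ===== SOURCE B (Python) =====
-- def count_good_characters(A, K):
--     n = len(A)
--     ans = 0
--     for o in range(26):
--         c = chr(ord('a') + o)
--         for l in range(n):
--             cnt = 0
--             for r in range(l, n):
--                 if A[r] == c:
--                     cnt += 1
--                 if cnt >= 1 and 2 * cnt - (r - l + 1) == K: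
--                     ans += 1
--     return ans
-- ===== Notes on version B (the rewrite author's own statement) =====
-- stated objective: simpler
-- what changed: Replaces the per-letter prefix-sum frequency-array single pass (with its wraparound-prone mp[total-K] lookup and negative-K correction) by a plain per-letter window scan over all (l,r) substrings counting matches directly.
-- intended difference: For nonempty A with K > len(A) the true count is 0 and B returns 0, but A's mp[total-K] lookup uses a negative Python index that wraps around the frequency array and counts unrelated slots, so A returns an accidental value (e.g. A('a',2)=25); B's 0 is the intended count. — e.g. on count_good_characters("a", 2): A returns 25, B returns 0
import Mathlib
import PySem

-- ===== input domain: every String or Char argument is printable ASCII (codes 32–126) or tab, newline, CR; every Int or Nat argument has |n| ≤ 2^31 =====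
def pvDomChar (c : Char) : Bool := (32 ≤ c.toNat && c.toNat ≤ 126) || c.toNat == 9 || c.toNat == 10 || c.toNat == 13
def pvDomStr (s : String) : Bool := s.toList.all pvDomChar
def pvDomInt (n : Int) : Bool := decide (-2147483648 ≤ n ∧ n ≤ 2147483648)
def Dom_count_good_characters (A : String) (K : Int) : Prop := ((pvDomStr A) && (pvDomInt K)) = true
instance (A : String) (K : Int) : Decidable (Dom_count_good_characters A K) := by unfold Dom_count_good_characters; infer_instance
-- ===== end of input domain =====

-- B replaces A's per-letter prefix-sum frequency-array pass by a plain per-letter scan of all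
-- (l, r) windows (simpler, not faster); on nonempty A with K > len(A), where A's mp[total-K]
-- negative-index wraparound yields an accidental value, B returns the intended count 0 (see D_).

-- ===== PORT A =====
-- Literal port of A.  mp[total-K] is PySem.List.pyGetD with default 0: the default is only
-- reachable where Python raises IndexError, which Pre_ excludes.
def count_good_characters (A : String) (K : Int) : Int :=
  let cs := A.toList
  let n : Nat := cs.length
  (PySem.List.pyRange 0 26 1).foldl (fun ans o =>
    let mp : List Int := PySem.List.pySetD (List.replicate (2*n+1) (0:Int)) (n : Int) 1
    let st :=
      (PySem.List.pyRange 0 (n : Int) 1).foldl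
        (fun (st : List Int × Int × Int × List Int × Int) i =>
          let x : Int := if PySem.List.pyGetD cs i ' ' = Char.ofNat (97 + o).toNat then 1 else -1
          let occurrence := st.2.1 + x
          let total := st.2.2.1 + x
          let prefix_sum := PySem.List.pySetD st.2.2.2.1 (i+1) total
          let ans2 := st.2.2.2.2 + PySem.List.pyGetD st.1 (total - K) 0
          let ans3 := if K < 0 ∧ 0 ≤ i + 1 + K ∧ PySem.List.pyGetD prefix_sum (i+1+K) 0 = total - K
                      then ans2 - 1 else ans2
          let mp2 := PySem.List.pySetD st.1 total (PySem.List.pyGetD st.1 total 0 + 1)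
          (mp2, occurrence, total, prefix_sum, ans3))
        (mp, 0, (n : Int), List.replicate (n+1) ((n : Int)), ans)
    st.2.2.2.2) 0

-- ===== PORT B =====
def count_good_characters_alt (A : String) (K : Int) : Int :=
  let cs := A.toList
  let n : Nat := cs.length
  (PySem.List.pyRange 0 26 1).foldl (fun ans o =>
    let c := Char.ofNat (97 + o).toNat
    (PySem.List.pyRange 0 (n : Int) 1).foldl (fun ans l =>
      ((PySem.List.pyRange l (n : Int) 1).foldl
        (fun (st : Int × Int) r =>
          let cnt := if PySem.List.pyGetD cs r ' ' = c then st.1 + 1 else st.1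
          let ans := if 1 ≤ cnt ∧ 2*cnt - (r - l + 1) = K then st.2 + 1 else st.2
          (cnt, ans))
        ((0:Int), ans)).2) ans) 0

-- ===== PRECONDITION & SPEC =====
-- x-value of one character: +1 if it is the chosen letter, -1 otherwise
def pvX (c a : Char) : Int := if a = c then 1 else -1
-- transformed sum of a character list
def pvOcc (c : Char) (l : List Char) : Int := (l.map (pvX c)).sum
-- A's running `total` after j steps of the inner loop
def pvT (cs : List Char) (c : Char) (j : Nat) : Int := (cs.length : Int) + pvOcc c (cs.take j)
-- Pre_ excludes exactly the inputs where A raises IndexError: A reads mp[total-K] where mp has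
-- length 2*len(A)+1 and total is the running prefix value n + (2*count_c - i) for some letter c
-- and prefix length i ≥ 1; Python raises iff some such index leaves [-(2n+1), 2n].
def Pre_count_good_characters (A : String) (K : Int) : Prop :=
  ∀ j ∈ Finset.range 26, ∀ i ∈ Finset.Icc 1 A.toList.length,
    K - (2 * (A.toList.length : Int) + 1) ≤ pvT A.toList (Char.ofNat (97 + j)) i
    ∧ pvT A.toList (Char.ofNat (97 + j)) i - K ≤ 2 * (A.toList.length : Int)
instance (A : String) (K : Int) : Decidable (Pre_count_good_characters A K) := by
  unfold Pre_count_good_characters; infer_instance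
def pvWitness_count_good_characters : String × Int := ("ab", 1)

-- On nonempty A with K > len(A) the true count is 0 and B returns 0, but A's mp[total-K]
-- lookup uses a negative Python index that wraps around the frequency array and counts
-- unrelated slots, so A returns an accidental value; B's 0 is the intended count.
def D_count_good_characters (A : String) (K : Int) : Prop :=
  0 < A.toList.length ∧ (A.toList.length : Int) < K
instance (A : String) (K : Int) : Decidable (D_count_good_characters A K) := by
  unfold D_count_good_characters; infer_instance

def Spec_count_good_characters (A : String) (K : Int) (out : Int) : Prop :=
  ¬ D_count_good_characters A K → out = count_good_characters_alt A K
instance (A : String) (K : Int) (out : Int) : Decidable (Spec_count_good_characters A K out) := by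
  unfold Spec_count_good_characters; infer_instance

def pvDiffWitness_count_good_characters : String × Int := ("a", 2)
def pvDiffWitnessOut_count_good_characters : Int × Int := (25, 0)

-- ===== CLAIM (what is proved, stated in full; the proofs are below) =====
def Claim_unchanged_count_good_characters : Prop := ∀ (A : String) (K : Int), Dom_count_good_characters A K → Pre_count_good_characters A K → Spec_count_good_characters A K (count_good_characters A K)
def Claim_changed_count_good_characters : Prop := Dom_count_good_characters (pvDiffWitness_count_good_characters.1) (pvDiffWitness_count_good_characters.2) ∧ Pre_count_good_characters (pvDiffWitness_count_good_characters.1) (pvDiffWitness_count_good_characters.2) ∧ D_count_good_characters (pvDiffWitness_count_good_characters.1) (pvDiffWitness_count_good_characters.2) ∧ count_good_characters (pvDiffWitness_count_good_characters.1) (pvDiffWitness_count_good_characters.2) = pvDiffWitnessOut_count_good_characters.1 ∧ count_good_characters_alt (pvDiffWitness_count_good_characters.1) (pvDiffWitness_count_good_characters.2) = pvDiffWitnessOut_count_good_characters.2 ∧ pvDiffWitnessOut_count_good_characters.1 ≠ pvDiffWitnessOut_count_good_characters.2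

-- ===== LEMMAS AND PROOFS =====

-- number of prefix indices j ≤ m whose total equals v
def pvCnt (cs : List Char) (c : Char) (m : Nat) (v : Int) : Int :=
  ∑ j ∈ Finset.range (m+1), if pvT cs c j = v then 1 else 0
-- the frequency array mp after m steps
def pvMp (cs : List Char) (c : Char) (m : Nat) : List Int :=
  (List.range (2*cs.length+1)).map (fun v : Nat => pvCnt cs c m (v : Int))
-- the prefix_sum list after m steps (entries beyond m still hold the initial value n)
def pvPs (cs : List Char) (c : Char) (m : Nat) : List Int :=
  (List.range (cs.length+1)).map (fun j : Nat => if j ≤ m then pvT cs c j else (cs.length : Int))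
-- A's negative-K correction at step i
def pvCorr (cs : List Char) (c : Char) (K : Int) (i : Nat) : Int :=
  if K < 0 ∧ 0 ≤ (i:Int) + 1 + K ∧ pvT cs c ((i:Int) + 1 + K).toNat = pvT cs c (i+1) - K
  then 1 else 0
-- A's per-letter answer contribution after m steps
def pvPair (cs : List Char) (c : Char) (K : Int) (m : Nat) : Int :=
  ∑ i ∈ Finset.range m, (pvCnt cs c i (pvT cs c (i+1) - K) - pvCorr cs c K i)
-- count of letter c in window [l, m)
def pvBC (cs : List Char) (c : Char) (l m : Nat) : Int := (((cs.take m).drop l).count c : Int)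
-- B's indicator for window [l, r]
def pvBI (cs : List Char) (c : Char) (K : Int) (l r : Nat) : Int :=
  if 1 ≤ pvBC cs c l (r+1) ∧ 2 * pvBC cs c l (r+1) - ((r:Int) - (l:Int) + 1) = K then 1 else 0

theorem pvOcc_eq (c : Char) (l : List Char) : pvOcc c l = 2 * (l.count c : Int) - l.length := by
  induction l with
  | nil => simp [pvOcc]
  | cons a t ih =>
    by_cases h : a = c <;>
      simp [pvOcc, pvX, h, List.map_cons, List.sum_cons, pvOcc] at ih ⊢ <;>
      omega

theorem pvOcc_abs_le (c : Char) (l : List Char) : |pvOcc c l| ≤ (l.length : Int) := by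
  have h := pvOcc_eq c l
  have h2 : l.count c ≤ l.length := List.count_le_length
  rw [abs_le]; omega

theorem pvOcc_append (c : Char) (l₁ l₂ : List Char) :
    pvOcc c (l₁ ++ l₂) = pvOcc c l₁ + pvOcc c l₂ := by
  simp [pvOcc]

theorem pvTake_split (cs : List Char) (a b : Nat) (h : a ≤ b) :
    cs.take b = cs.take a ++ (cs.take b).drop a := by
  conv_lhs => rw [← List.take_append_drop a (cs.take b)]
  rw [List.take_take, Nat.min_eq_left h]

theorem pvOcc_take_sub (cs : List Char) (c : Char) (a b : Nat) (h : a ≤ b) :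
    pvOcc c (cs.take b) - pvOcc c (cs.take a) = pvOcc c ((cs.take b).drop a) := by
  conv_lhs => rw [pvTake_split cs a b h]
  rw [pvOcc_append]; ring

theorem pvWindow_len (cs : List Char) (a b : Nat) (h : a ≤ b) :
    (((cs.take b).drop a).length : Int) ≤ (b : Int) - a := by
  have h1 : ((cs.take b).drop a).length ≤ b - a := by
    simp [List.length_drop, List.length_take]; omega
  omega

theorem pvT_diff_abs_le (cs : List Char) (c : Char) (a b : Nat) (h : a ≤ b) :
    |pvT cs c b - pvT cs c a| ≤ (b : Int) - a := by
  have hd := pvOcc_take_sub cs c a b h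
  have habs := pvOcc_abs_le c ((cs.take b).drop a)
  have hlen := pvWindow_len cs a b h
  simp only [pvT]
  rw [abs_le] at habs ⊢
  omega

theorem pvT_bounds (cs : List Char) (c : Char) (j : Nat) (_h : j ≤ cs.length) :
    0 ≤ pvT cs c j ∧ pvT cs c j ≤ 2 * cs.length := by
  have habs := pvOcc_abs_le c (cs.take j)
  have hlen : ((cs.take j).length : Int) ≤ (cs.length : Int) := by
    simp [List.length_take]
  simp only [pvT]
  rw [abs_le] at habs
  omega

theorem pvTake_succ_window (cs : List Char) (l m : Nat) (h : l ≤ m) (hm : m < cs.length) :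
    (cs.take (m+1)).drop l = (cs.take m).drop l ++ [cs[m]] := by
  rw [List.take_add_one, List.getElem?_eq_getElem hm, Option.toList_some,
      List.drop_append_of_le_length (by simp [List.length_take]; omega)]

theorem pvT_succ (cs : List Char) (c : Char) (m : Nat) (hm : m < cs.length) :
    pvT cs c (m+1) = pvT cs c m + pvX c cs[m] := by
  simp only [pvT]
  have := pvOcc_take_sub cs c m (m+1) (Nat.le_succ m)
  rw [pvTake_succ_window cs m m (le_refl m) hm] at this
  simp [pvOcc] at this ⊢
  omega

theorem pvBC_succ (cs : List Char) (c : Char) (l m : Nat) (h : l ≤ m) (hm : m < cs.length) :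
    pvBC cs c l (m+1) = pvBC cs c l m + (if cs[m] = c then 1 else 0) := by
  simp only [pvBC]
  rw [pvTake_succ_window cs l m h hm, List.count_append]
  by_cases hc : cs[m] = c <;> simp [hc]

theorem pvOcc_window (cs : List Char) (c : Char) (l m : Nat) (h : l ≤ m) (hm : m ≤ cs.length) :
    pvT cs c m - pvT cs c l = 2 * pvBC cs c l m - ((m : Int) - l) := by
  have hd := pvOcc_take_sub cs c l m h
  have he := pvOcc_eq c ((cs.take m).drop l)
  have hlen : (((cs.take m).drop l).length : Int) = (m : Int) - l := by
    have : ((cs.take m).drop l).length = m - l := by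
      simp [List.length_drop, List.length_take]; omega
    omega
  simp only [pvT, pvBC] at *
  omega

theorem pvCnt_succ (cs : List Char) (c : Char) (m : Nat) (v : Int) :
    pvCnt cs c (m+1) v = pvCnt cs c m v + if pvT cs c (m+1) = v then 1 else 0 := by
  simp only [pvCnt]
  exact Finset.sum_range_succ _ _

theorem pvCnt_eq_zero (cs : List Char) (c : Char) (m : Nat) (v : Int)
    (h : ∀ j, j ≤ m → pvT cs c j ≠ v) : pvCnt cs c m v = 0 := by
  apply Finset.sum_eq_zero
  intro j hj
  rw [if_neg (h j (Nat.lt_succ_iff.mp (Finset.mem_range.mp hj)))]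

theorem pvMp_len (cs : List Char) (c : Char) (m : Nat) :
    (pvMp cs c m).length = 2*cs.length+1 := by
  simp [pvMp]

theorem pvMp_getElem (cs : List Char) (c : Char) (m : Nat) (i : Nat)
    (h : i < 2*cs.length+1) :
    (pvMp cs c m)[i]'(by rw [pvMp_len]; exact h) = pvCnt cs c m (i : Int) := by
  simp only [pvMp]
  rw [List.getElem_map, List.getElem_range]

theorem pvMp_read (cs : List Char) (c : Char) (m : Nat) (v : Int)
    (h0 : 0 ≤ v) (h2 : v ≤ 2 * (cs.length : Int)) :
    PySem.List.pyGetD (pvMp cs c m) v 0 = pvCnt cs c m v := by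
  rw [PySem.List.pyGetD_eq_getElem _ _ h0 (by rw [pvMp_len]; push_cast; omega)]
  rw [pvMp_getElem cs c m v.toNat (by omega)]
  congr 1
  omega

theorem pvMp_read_K (cs : List Char) (c : Char) (K : Int) (m : Nat)
    (hKn : K ≤ (cs.length : Int)) (hm : m < cs.length)
    (hup : pvT cs c (m+1) - K ≤ 2 * (cs.length : Int)) :
    PySem.List.pyGetD (pvMp cs c m) (pvT cs c (m+1) - K) 0
      = pvCnt cs c m (pvT cs c (m+1) - K) := by
  have hb := pvT_bounds cs c (m+1) (by omega)
  by_cases hneg : 0 ≤ pvT cs c (m+1) - K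
  · exact pvMp_read cs c m _ hneg hup
  · push_neg at hneg
    have hrhs : pvCnt cs c m (pvT cs c (m+1) - K) = 0 := by
      apply pvCnt_eq_zero
      intro j hj
      have := (pvT_bounds cs c j (by omega)).1
      omega
    rw [hrhs]
    -- negative Python index: wraps to position 2*n+1 + (total-K)
    set t : Int := pvT cs c (m+1) - K with ht
    have hk1 : 0 < (-t).toNat := by omega
    have hk2 : (-t).toNat ≤ (pvMp cs c m).length := by rw [pvMp_len]; omega
    have hteq : t = -(((-t).toNat : Nat) : Int) := by omega
    rw [hteq, PySem.List.pyGetD_neg_natCast _ _ _ hk1 hk2]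
    have hlen : (pvMp cs c m).length = 2*cs.length+1 := pvMp_len cs c m
    rw [hlen] at hk2
    simp only [pvMp_len]
    rw [pvMp_getElem cs c m (2*cs.length+1 - (-t).toNat) (by omega)]
    apply pvCnt_eq_zero
    intro j hj hTj
    -- pvT j - pvT (m+1) = 2n+1-K > n, impossible for totals n apart
    have hd := pvT_diff_abs_le cs c j (m+1) (by omega)
    have hcast : ((2 * cs.length + 1 - (-t).toNat : Nat) : Int)
        = 2 * (cs.length : Int) + 1 + t := by
      push_cast [Nat.cast_sub hk2]; omega
    rw [hcast] at hTj
    rw [abs_le] at hd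
    have hmn : ((m:Int) + 1) ≤ (cs.length : Int) := by exact_mod_cast hm
    omega

theorem pvMp_zero (cs : List Char) (c : Char) :
    PySem.List.pySetD (List.replicate (2*cs.length+1) (0:Int)) ((cs.length : Nat) : Int) 1
      = pvMp cs c 0 := by
  rw [PySem.List.pySetD_natCast]
  apply List.ext_getElem
  · simp [pvMp_len]
  · intro i h1 h2
    rw [pvMp_len] at h2
    rw [List.getElem_set, pvMp_getElem cs c 0 i h2]
    have hT0 : pvT cs c 0 = (cs.length : Int) := by simp [pvT, pvOcc]
    simp only [pvCnt, Nat.zero_add, Finset.sum_range_one, hT0]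
    by_cases hi : cs.length = i
    · rw [if_pos hi, if_pos (by exact_mod_cast hi)]
    · rw [if_neg hi, if_neg (fun hc => hi (by exact_mod_cast hc)), List.getElem_replicate]

theorem pvMp_succ (cs : List Char) (c : Char) (m : Nat) (hm : m < cs.length) :
    PySem.List.pySetD (pvMp cs c m) (pvT cs c (m+1))
        (PySem.List.pyGetD (pvMp cs c m) (pvT cs c (m+1)) 0 + 1)
      = pvMp cs c (m+1) := by
  have hb := pvT_bounds cs c (m+1) (by omega)
  rw [pvMp_read cs c m _ hb.1 (by omega)]
  rw [PySem.List.pySetD_of_nonneg _ _ hb.1]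
  apply List.ext_getElem
  · simp [pvMp_len]
  · intro i h1 h2
    rw [pvMp_len] at h2
    rw [List.getElem_set, pvMp_getElem cs c (m+1) i h2, pvCnt_succ]
    by_cases hi : (pvT cs c (m+1)).toNat = i
    · rw [if_pos hi, if_pos (by omega)]
      have hieq : ((i:Nat):Int) = pvT cs c (m+1) := by omega
      rw [hieq]
    · rw [if_neg hi, pvMp_getElem cs c m i h2, if_neg (by omega), add_zero]

theorem pvPs_len (cs : List Char) (c : Char) (m : Nat) :
    (pvPs cs c m).length = cs.length+1 := by
  simp [pvPs]

theorem pvPs_getElem (cs : List Char) (c : Char) (m : Nat) (i : Nat) (h : i < cs.length+1) :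
    (pvPs cs c m)[i]'(by rw [pvPs_len]; exact h)
      = if i ≤ m then pvT cs c i else (cs.length : Int) := by
  simp only [pvPs]
  rw [List.getElem_map, List.getElem_range]

theorem pvPs_zero (cs : List Char) (c : Char) :
    List.replicate (cs.length+1) ((cs.length : Nat) : Int) = pvPs cs c 0 := by
  apply List.ext_getElem
  · simp [pvPs_len]
  · intro i h1 h2
    rw [pvPs_len] at h2
    rw [List.getElem_replicate, pvPs_getElem cs c 0 i h2]
    by_cases hi : i ≤ 0
    · have hi0 : i = 0 := by omega
      subst hi0
      rw [if_pos hi]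
      simp [pvT, pvOcc]
    · rw [if_neg hi]

theorem pvPs_succ (cs : List Char) (c : Char) (m : Nat) (_hm : m < cs.length) :
    PySem.List.pySetD (pvPs cs c m) (((m : Nat) : Int)+1) (pvT cs c (m+1)) = pvPs cs c (m+1) := by
  rw [PySem.List.pySetD_of_nonneg _ _ (by positivity)]
  apply List.ext_getElem
  · simp [pvPs_len]
  · intro i h1 h2
    rw [pvPs_len] at h2
    have hidx : (((m : Nat) : Int)+1).toNat = m+1 := by omega
    simp only [hidx]
    rw [List.getElem_set, pvPs_getElem cs c (m+1) i h2]
    by_cases he : m+1 = i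
    · rw [if_pos he, if_pos (by omega), ← he]
    · rw [if_neg he, pvPs_getElem cs c m i h2]
      by_cases hi : i ≤ m
      · rw [if_pos hi, if_pos (by omega)]
      · rw [if_neg hi, if_neg (by omega)]

theorem pvPs_read (cs : List Char) (c : Char) (m : Nat) (idx : Int)
    (h0 : 0 ≤ idx) (h1 : idx ≤ (m : Int)) (_hm : m ≤ cs.length) :
    PySem.List.pyGetD (pvPs cs c m) idx 0 = pvT cs c idx.toNat := by
  rw [PySem.List.pyGetD_eq_getElem _ _ h0 (by rw [pvPs_len]; push_cast; omega)]
  rw [pvPs_getElem cs c m idx.toNat (by omega)]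
  rw [if_pos (by omega)]

-- the negative-K correction branch of A equals pvCorr
theorem pvCorr_step (cs : List Char) (c : Char) (K : Int) (m : Nat)
    (hm : m < cs.length) (a : Int) :
    (if K < 0 ∧ 0 ≤ ((m : Nat) : Int) + 1 + K ∧
        PySem.List.pyGetD (pvPs cs c (m+1)) (((m : Nat) : Int)+1+K) 0 = pvT cs c (m+1) - K
     then a - 1 else a)
      = a - pvCorr cs c K m := by
  simp only [pvCorr]
  by_cases h1 : K < 0 ∧ 0 ≤ ((m : Nat) : Int) + 1 + K
  · have hread : PySem.List.pyGetD (pvPs cs c (m+1)) (((m : Nat) : Int)+1+K) 0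
        = pvT cs c ((((m : Nat) : Int)+1+K)).toNat :=
      pvPs_read cs c (m+1) _ h1.2 (by push_cast; omega) (by omega)
    rw [hread]
    split_ifs with h2 <;> ring
  · rw [if_neg (fun hc => h1 ⟨hc.1, hc.2.1⟩), if_neg (fun hc => h1 ⟨hc.1, hc.2.1⟩)]
    ring

-- characterization of A's inner loop after m steps
theorem pvA_loop (cs : List Char) (c : Char) (K : Int)
    (hKn : K ≤ (cs.length : Int))
    (hup : ∀ i : Nat, 1 ≤ i → i ≤ cs.length → pvT cs c i - K ≤ 2 * (cs.length : Int)) :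
    ∀ (m : Nat), m ≤ cs.length → ∀ (ans : Int),
    ∃ oc,
      (PySem.List.pyRange 0 ((m : Nat) : Int) 1).foldl
        (fun (st : List Int × Int × Int × List Int × Int) i =>
          let x : Int := if PySem.List.pyGetD cs i ' ' = c then 1 else -1
          let occurrence := st.2.1 + x
          let total := st.2.2.1 + x
          let prefix_sum := PySem.List.pySetD st.2.2.2.1 (i+1) total
          let ans2 := st.2.2.2.2 + PySem.List.pyGetD st.1 (total - K) 0
          let ans3 := if K < 0 ∧ 0 ≤ i + 1 + K ∧ PySem.List.pyGetD prefix_sum (i+1+K) 0 = total - K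
                      then ans2 - 1 else ans2
          let mp2 := PySem.List.pySetD st.1 total (PySem.List.pyGetD st.1 total 0 + 1)
          (mp2, occurrence, total, prefix_sum, ans3))
        (PySem.List.pySetD (List.replicate (2*cs.length+1) (0:Int)) ((cs.length : Nat) : Int) 1,
          0, ((cs.length : Nat) : Int), List.replicate (cs.length+1) ((cs.length : Nat) : Int), ans)
      = (pvMp cs c m, oc, pvT cs c m, pvPs cs c m, ans + pvPair cs c K m) := by
  intro m
  induction m with
  | zero =>
    intro _ ans
    refine ⟨0, ?_⟩
    rw [Nat.cast_zero, PySem.List.pyRange_one_eq_nil (le_refl 0), List.foldl_nil]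
    rw [pvMp_zero cs c, pvPs_zero cs c]
    have hT0 : pvT cs c 0 = (cs.length : Int) := by simp [pvT, pvOcc]
    simp [pvPair, hT0]
  | succ m ih =>
    intro hm ans
    obtain ⟨oc, ih⟩ := ih (by omega) ans
    have hcast : (((m+1 : Nat)) : Int) = ((m : Nat) : Int) + 1 := by push_cast; ring
    rw [hcast, PySem.List.pyRange_one_succ_right (by positivity), List.foldl_append, ih,
        List.foldl_cons, List.foldl_nil]
    have hmlt : m < cs.length := by omega
    have hx : (if PySem.List.pyGetD cs ((m : Nat) : Int) ' ' = c then (1:Int) else -1)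
        = pvX c cs[m] := by
      rw [PySem.List.pyGetD_eq_getElem cs ' ' (by positivity) (by exact_mod_cast hmlt)]
      simp [pvX, Int.toNat_natCast]
    refine ⟨oc + pvX c cs[m], ?_⟩
    simp only [hx]
    have htot : pvT cs c m + pvX c cs[m] = pvT cs c (m+1) := (pvT_succ cs c m hmlt).symm
    simp only [htot]
    rw [pvMp_read_K cs c K m hKn hmlt (hup (m+1) (by omega) (by omega))]
    rw [pvPs_succ cs c m hmlt]
    rw [pvCorr_step cs c K m hmlt]
    rw [pvMp_succ cs c m hmlt]
    have hpair : pvPair cs c K (m+1)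
        = pvPair cs c K m + (pvCnt cs c m (pvT cs c (m+1) - K) - pvCorr cs c K m) :=
      Finset.sum_range_succ _ _
    rw [hpair]
    simp only [Prod.mk.injEq, true_and]
    ring

-- characterization of B's innermost loop
theorem pvB_inner (cs : List Char) (c : Char) (K : Int) (l : Nat) :
    ∀ (m : Nat), l ≤ m → m ≤ cs.length → ∀ (ans : Int),
    (PySem.List.pyRange ((l : Nat) : Int) ((m : Nat) : Int) 1).foldl
      (fun (st : Int × Int) r =>
        let cnt := if PySem.List.pyGetD cs r ' ' = c then st.1 + 1 else st.1
        let ans := if 1 ≤ cnt ∧ 2*cnt - (r - ((l : Nat) : Int) + 1) = K then st.2 + 1 else st.2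
        (cnt, ans))
      ((0:Int), ans)
    = (pvBC cs c l m, ans + ∑ r ∈ Finset.Ico l m, pvBI cs c K l r) := by
  intro m
  induction m with
  | zero =>
    intro hl _ ans
    have hl0 : l = 0 := by omega
    subst hl0
    simp only [Nat.cast_zero]
    rw [PySem.List.pyRange_one_eq_nil (le_refl 0), List.foldl_nil]
    simp [pvBC]
  | succ m ih =>
    intro hl hm ans
    by_cases hlm : l = m + 1
    · subst hlm
      rw [PySem.List.pyRange_one_eq_nil (le_refl _), List.foldl_nil]
      simp [pvBC]
    · have hl' : l ≤ m := by omega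
      have hmlt : m < cs.length := by omega
      have hcast : (((m+1 : Nat)) : Int) = ((m : Nat) : Int) + 1 := by push_cast; ring
      rw [hcast, PySem.List.pyRange_one_succ_right (by exact_mod_cast hl'), List.foldl_append,
          ih hl' (by omega) ans, List.foldl_cons, List.foldl_nil]
      have hx : (if PySem.List.pyGetD cs ((m : Nat) : Int) ' ' = c then
            pvBC cs c l m + 1 else pvBC cs c l m) = pvBC cs c l (m+1) := by
        rw [PySem.List.pyGetD_eq_getElem cs ' ' (by positivity) (by exact_mod_cast hmlt),
            pvBC_succ cs c l m hl' hmlt]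
        simp [Int.toNat_natCast]
        split <;> simp
      simp only []
      rw [hx]
      have hsum : ∑ r ∈ Finset.Ico l (m+1), pvBI cs c K l r
          = (∑ r ∈ Finset.Ico l m, pvBI cs c K l r) + pvBI cs c K l m :=
        Finset.sum_Ico_succ_top hl' _
      rw [hsum]
      simp only [pvBI, Prod.mk.injEq, true_and]
      split_ifs with h <;> ring

-- characterization of B's middle loop
theorem pvB_outer (cs : List Char) (c : Char) (K : Int) :
    ∀ (m : Nat), m ≤ cs.length → ∀ (ans : Int),
    (PySem.List.pyRange 0 ((m : Nat) : Int) 1).foldl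
      (fun ans l =>
        ((PySem.List.pyRange l ((cs.length : Nat) : Int) 1).foldl
          (fun (st : Int × Int) r =>
            let cnt := if PySem.List.pyGetD cs r ' ' = c then st.1 + 1 else st.1
            let ans := if 1 ≤ cnt ∧ 2*cnt - (r - l + 1) = K then st.2 + 1 else st.2
            (cnt, ans))
          ((0:Int), ans)).2) ans
    = ans + ∑ l ∈ Finset.range m, ∑ r ∈ Finset.Ico l cs.length, pvBI cs c K l r := by
  intro m
  induction m with
  | zero =>
    intro _ ans
    rw [Nat.cast_zero, PySem.List.pyRange_one_eq_nil (le_refl 0), List.foldl_nil]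
    simp
  | succ m ih =>
    intro hm ans
    have hcast : (((m+1 : Nat)) : Int) = ((m : Nat) : Int) + 1 := by push_cast; ring
    rw [hcast, PySem.List.pyRange_one_succ_right (by positivity), List.foldl_append,
        ih (by omega) ans, List.foldl_cons, List.foldl_nil]
    rw [pvB_inner cs c K m cs.length (by omega) (le_refl _)]
    rw [Finset.sum_range_succ]
    ring

-- per-letter equality of the two counts (0 ≤ K ≤ n)
theorem pvBC_le (cs : List Char) (c : Char) (l r : Nat) (hl : l ≤ r) (hr : r < cs.length) :
    pvBC cs c l (r+1) ≤ (r : Int) + 1 - l := by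
  have h1 : ((cs.take (r+1)).drop l).length = r+1-l := by
    simp [List.length_drop, List.length_take]; omega
  have h2 : ((cs.take (r+1)).drop l).count c ≤ ((cs.take (r+1)).drop l).length :=
    List.count_le_length
  rw [h1] at h2
  simp only [pvBC]
  omega

-- pointwise bridge: a prefix-pair hit is a window B counts, plus the one cnt = 0 window
-- (length exactly -K) that A's correction removes
theorem pvPoint (cs : List Char) (c : Char) (K : Int) (j r : Nat)
    (hj : j ≤ r) (hr : r < cs.length) :
    (if pvT cs c j = pvT cs c (r+1) - K then (1:Int) else 0)
      = pvBI cs c K j r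
        + (if K < 0 ∧ 0 ≤ (r:Int) + 1 + K ∧ (j:Int) = (r:Int) + 1 + K
              ∧ pvT cs c j = pvT cs c (r+1) - K then 1 else 0) := by
  have hw := pvOcc_window cs c j (r+1) (by omega) (by omega)
  have hbc0 : 0 ≤ pvBC cs c j (r+1) := by
    simp only [pvBC]; exact Int.natCast_nonneg _
  have hbcle := pvBC_le cs c j r hj hr
  have hjr : (j:Int) ≤ (r:Int) := by exact_mod_cast hj
  push_cast at hw
  simp only [pvBI]
  split_ifs <;> omega

theorem pvCorr_sum (cs : List Char) (c : Char) (K : Int) (r : Nat) :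
    (∑ j ∈ Finset.range (r+1),
        if K < 0 ∧ 0 ≤ (r:Int) + 1 + K ∧ (j:Int) = (r:Int) + 1 + K
            ∧ pvT cs c j = pvT cs c (r+1) - K then (1:Int) else 0)
      = pvCorr cs c K r := by
  simp only [pvCorr]
  by_cases h1 : K < 0 ∧ 0 ≤ (r:Int) + 1 + K ∧ pvT cs c ((r:Int)+1+K).toNat = pvT cs c (r+1) - K
  · obtain ⟨ha, hb, hc⟩ := h1
    rw [if_pos ⟨ha, hb, hc⟩]
    refine (Finset.sum_eq_single_of_mem (((r:Int)+1+K).toNat)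
        (Finset.mem_range.mpr (by omega)) ?_).trans ?_
    · intro j hjm hjne
      rw [if_neg]
      rintro ⟨-, -, hje, -⟩
      exact hjne (by omega)
    · rw [if_pos ⟨ha, hb, by omega, hc⟩]
  · rw [if_neg h1]
    apply Finset.sum_eq_zero
    intro j hj
    rw [if_neg]
    rintro ⟨ha, hb, hje, hc⟩
    apply h1
    refine ⟨ha, hb, ?_⟩
    have hjj : j = ((r:Int)+1+K).toNat := by omega
    rw [← hjj]
    exact hc

-- per-letter equality of the two counts
theorem pvLetter_eq (cs : List Char) (c : Char) (K : Int) :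
    pvPair cs c K cs.length
      = ∑ l ∈ Finset.range cs.length, ∑ r ∈ Finset.Ico l cs.length, pvBI cs c K l r := by
  have hmain : ∀ r ∈ Finset.range cs.length,
      pvCnt cs c r (pvT cs c (r+1) - K) - pvCorr cs c K r
        = ∑ j ∈ Finset.range (r+1), pvBI cs c K j r := by
    intro r hr
    rw [Finset.mem_range] at hr
    have hsum : pvCnt cs c r (pvT cs c (r+1) - K)
        = (∑ j ∈ Finset.range (r+1), pvBI cs c K j r) + pvCorr cs c K r := by
      rw [← pvCorr_sum cs c K r, ← Finset.sum_add_distrib]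
      apply Finset.sum_congr rfl
      intro j hj
      rw [Finset.mem_range] at hj
      exact pvPoint cs c K j r (by omega) hr
    omega
  simp only [pvPair]
  rw [Finset.sum_congr rfl hmain]
  simp only [Finset.range_eq_Ico]
  rw [Finset.sum_Ico_Ico_comm]

-- the n = 0 case: both programs return 0
theorem pv_nil_case (A : String) (K : Int) (h : A.toList.length = 0) :
    count_good_characters A K = count_good_characters_alt A K := by
  have hcs : A.toList = [] := List.length_eq_zero_iff.mp h
  simp only [count_good_characters, count_good_characters_alt, hcs]
  simp [PySem.List.pyRange_one_eq_nil (le_refl 0), List.foldl_fixed]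

-- ===== VERDICT (by name: the statement is the Claim_ definition above) =====
theorem count_good_characters_spec : Claim_unchanged_count_good_characters := by
  intro A K hdom hpre
  unfold Spec_count_good_characters
  intro hnd
  by_cases hn : A.toList.length = 0
  · exact pv_nil_case A K hn
  · have hKn : K ≤ (A.toList.length : Int) := by
      unfold D_count_good_characters at hnd
      push_neg at hnd
      exact hnd (by omega)
    unfold Pre_count_good_characters at hpre
    simp only [count_good_characters, count_good_characters_alt]
    apply List.foldl_ext
    intro ans o ho
    rw [PySem.List.mem_pyRange_one] at ho
    have hco : Char.ofNat (97 + o).toNat = Char.ofNat (97 + o.toNat) := by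
      congr 1
      omega
    have hup : ∀ i : Nat, 1 ≤ i → i ≤ A.toList.length →
        pvT A.toList (Char.ofNat (97 + o).toNat) i - K ≤ 2 * (A.toList.length : Int) := by
      intro i h1 h2
      have hb := (hpre o.toNat (Finset.mem_range.mpr (by omega)) i
        (Finset.mem_Icc.mpr ⟨h1, h2⟩)).2
      rw [hco]
      exact hb
    obtain ⟨oc, hA⟩ :=
      pvA_loop A.toList (Char.ofNat (97 + o).toNat) K hKn hup A.toList.length (le_refl _) ans
    rw [hA]
    rw [pvB_outer A.toList (Char.ofNat (97 + o).toNat) K A.toList.length (le_refl _) ans]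
    simp only []
    rw [pvLetter_eq A.toList (Char.ofNat (97 + o).toNat) K]

theorem count_good_characters_changed : Claim_changed_count_good_characters := by
  unfold Claim_changed_count_good_characters; decide
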